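-- pv_equiv track=rewrite | github.com/zignalssss/ProblemSet_CompetitiveProgramming | Codeforce_Contest/D.py | solve_robin_hood
-- ===== SOURCE A (Python) =====
-- def solve_robin_hood(n, d, k, jobs):
--     overlap = [0] * (n + 1)
--     for l, r in jobs:
--         overlap[l] += 1
--         if r + 1 <= n:
--             overlap[r + 1] -= 1
--
--     for i in range(1, n + 1):
--         overlap[i] += overlap[i - 1]
--
--     best_brother_start = 1
--     best_brother_jobs = 0
--     best_mother_start = 1
--     best_mother_jobs = float('inf')
--     for start in range(1, n - d + 2):
--         end = start + d - 1
--         jobs_count = len(set(job for job in jobs if not (job[1] < start or job[0] > end)))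
--
--         if jobs_count > best_brother_jobs:
--             best_brother_jobs = jobs_count
--             best_brother_start = start
--
--         if jobs_count < best_mother_jobs:
--             best_mother_jobs = jobs_count
--             best_mother_start = start
--     return best_brother_start, best_mother_start
-- ===== SOURCE B (Python) =====
-- def solve_robin_hood(n, d, k, jobs):
--     m = n - d + 1                      # window starts are 1..m
--     if m < 1:
--         return 1, 1
--     diff = [0] * (m + 1)
--     for l, r in set(jobs):             # each distinct job covers starts [max(1,l-d+1), min(r,m)]
--         lo = l - d + 1
--         if lo < 1:
--             lo = 1
--         hi = r if r < m else m
--         if lo <= hi: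
--             diff[lo - 1] += 1
--             diff[hi] -= 1
--     best_b_start = 1
--     best_b = 0
--     best_m_start = 1
--     best_m = None
--     cur = 0
--     for s in range(1, m + 1):
--         cur += diff[s - 1]
--         if cur > best_b:
--             best_b = cur
--             best_b_start = s
--         if best_m is None or cur < best_m:
--             best_m = cur
--             best_m_start = s
--     return best_b_start, best_m_start
-- ===== Notes on version B (the rewrite author's own statement) =====
-- stated objective: faster
-- what changed: Per distinct job, add +1 over its valid-start interval in a difference array, then a single prefix-sum sweep finds the first argmax/argmin start, replacing A's per-start rebuild of a deduplicated set of overlapping jobs.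
import Mathlib
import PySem

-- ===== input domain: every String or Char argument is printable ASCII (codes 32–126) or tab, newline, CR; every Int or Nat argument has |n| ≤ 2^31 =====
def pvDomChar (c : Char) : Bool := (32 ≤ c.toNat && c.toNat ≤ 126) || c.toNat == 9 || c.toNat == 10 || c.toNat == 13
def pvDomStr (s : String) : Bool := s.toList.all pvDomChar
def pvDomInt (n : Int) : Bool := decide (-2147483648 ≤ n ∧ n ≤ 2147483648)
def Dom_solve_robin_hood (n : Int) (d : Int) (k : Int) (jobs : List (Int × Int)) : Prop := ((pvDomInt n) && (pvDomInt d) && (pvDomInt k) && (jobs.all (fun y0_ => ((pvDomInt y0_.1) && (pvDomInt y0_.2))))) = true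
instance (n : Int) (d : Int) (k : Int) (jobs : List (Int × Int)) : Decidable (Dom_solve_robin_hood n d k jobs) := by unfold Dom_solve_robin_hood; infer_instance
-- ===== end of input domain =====

-- B replaces A's per-start set-of-overlapping-jobs rebuild by a difference array over valid
-- starts (one entry per distinct job) plus a single prefix-sum sweep: O(n+k) instead of O(n*k).


-- ===== PORT A =====
-- 'xs[i] += δ' with Python index semantics; the 'none' (IndexError) case is excluded by Pre_
def pvBump (ov : List Int) (i : Int) (dl : Int) : List Int :=
  match PySem.List.pyGet? ov i with
  | some v => PySem.List.pySetD ov i (v + dl)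
  | none => ov

def solve_robin_hood (n : Int) (d : Int) (k : Int) (jobs : List (Int × Int)) : Int × Int :=
  let overlap0 : List Int := List.replicate (n + 1).toNat 0
  let overlap1 := jobs.foldl (fun ov j =>
      let ov := pvBump ov j.1 1
      if j.2 + 1 ≤ n then pvBump ov (j.2 + 1) (-1) else ov) overlap0
  -- prefix-sum loop over overlap (dead code in A: its result is never read)
  let _overlap2 := (PySem.List.pyRange 1 (n + 1) 1).foldl
      (fun ov i => pvBump ov i (PySem.List.pyGetD ov (i - 1) 0)) overlap1
  let fin := (PySem.List.pyRange 1 (n - d + 2) 1).foldl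
      (fun (st : Int × Int × Int × Option Int) start =>
        let endd := start + d - 1
        let cnt : Int :=
          ((PySem.Set.ofList (jobs.filter
              (fun job => !(decide (job.2 < start) || decide (job.1 > endd))))).length : Int)
        let st1 := if cnt > st.2.1 then (start, cnt, st.2.2) else st
        if (match st1.2.2.2 with | none => true | some v => decide (cnt < v)) then
          (st1.1, st1.2.1, start, some cnt)
        else st1)
      (1, 0, 1, none)
  (fin.1, fin.2.2.1)

-- ===== PORT B =====
-- one distinct job's ±1 marks on the difference array (indices always in range when lo ≤ hi)
def pvDiffStep (m : Int) (d : Int) (df : List Int) (j : Int × Int) : List Int :=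
  let lo := if j.1 - d + 1 < 1 then 1 else j.1 - d + 1
  let hi := if j.2 < m then j.2 else m
  if lo ≤ hi then
    let df := PySem.List.pySetD df (lo - 1) (PySem.List.pyGetD df (lo - 1) 0 + 1)
    PySem.List.pySetD df hi (PySem.List.pyGetD df hi 0 - 1)
  else df

def solve_robin_hood_alt (n : Int) (d : Int) (k : Int) (jobs : List (Int × Int)) : Int × Int :=
  let m := n - d + 1
  if m < 1 then (1, 1) else
  let diff0 : List Int := List.replicate (m + 1).toNat 0
  let diff := (PySem.Set.ofList jobs).foldl (pvDiffStep m d) diff0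
  let fin := (PySem.List.pyRange 1 (m + 1) 1).foldl
      (fun (st : Int × Int × Int × Int × Option Int) s =>
        let cur := st.1 + PySem.List.pyGetD diff (s - 1) 0
        let inner := st.2
        let inner := if cur > inner.2.1 then (s, cur, inner.2.2) else inner
        let inner := if (match inner.2.2.2 with | none => true | some v => decide (cur < v)) then
            (inner.1, inner.2.1, s, some cur)
          else inner
        (cur, inner))
      (0, 1, 0, 1, none)
  (fin.2.1, fin.2.2.2.1)

-- ===== PRECONDITION & SPEC =====
-- Pre_: exactly the inputs where A's overlap[l] / overlap[r+1] writes are valid Python indices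
-- into [0]*(n+1) (A raises IndexError otherwise); nothing else in A can raise.
def Pre_solve_robin_hood (n : Int) (d : Int) (k : Int) (jobs : List (Int × Int)) : Prop :=
  ∀ j ∈ jobs, (-(n + 1) ≤ j.1 ∧ j.1 ≤ n ∧ (j.2 + 1 ≤ n → -(n + 1) ≤ j.2 + 1))
instance (n : Int) (d : Int) (k : Int) (jobs : List (Int × Int)) : Decidable (Pre_solve_robin_hood n d k jobs) := by unfold Pre_solve_robin_hood; infer_instance

def pvWitness_solve_robin_hood : Int × Int × Int × (List (Int × Int)) := (5, 2, 1, [(1, 3), (2, 5)])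

def Spec_solve_robin_hood (n : Int) (d : Int) (k : Int) (jobs : List (Int × Int)) (out : Int × Int) : Prop := out = solve_robin_hood_alt n d k jobs
instance (n : Int) (d : Int) (k : Int) (jobs : List (Int × Int)) (out : Int × Int) : Decidable (Spec_solve_robin_hood n d k jobs out) := by unfold Spec_solve_robin_hood; infer_instance

-- ===== CLAIM (what is proved, stated in full; the proofs are below) =====
def Claim_equal_solve_robin_hood : Prop := ∀ (n : Int) (d : Int) (k : Int) (jobs : List (Int × Int)), Dom_solve_robin_hood n d k jobs → Pre_solve_robin_hood n d k jobs → Spec_solve_robin_hood n d k jobs (solve_robin_hood n d k jobs)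

-- ===== LEMMAS AND PROOFS =====

-- interval of valid starts covered by a job, as computed by pvDiffStep
def pvLo (d : Int) (j : Int × Int) : Int := if j.1 - d + 1 < 1 then 1 else j.1 - d + 1
def pvHi (m : Int) (j : Int × Int) : Int := if j.2 < m then j.2 else m

-- the shared "update best brother / best mother" step (both ports' loop bodies are zeta-equal to it)
def pvSel (s cnt : Int) (st : Int × Int × Int × Option Int) : Int × Int × Int × Option Int :=
  let st1 := if cnt > st.2.1 then (s, cnt, st.2.2) else st
  if (match st1.2.2.2 with | none => true | some v => decide (cnt < v)) then
    (st1.1, st1.2.1, s, some cnt)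
  else st1

theorem pvLo_ge_one (d : Int) (j : Int × Int) : 1 ≤ pvLo d j := by
  unfold pvLo; split <;> omega

theorem pvHi_le (m : Int) (j : Int × Int) : pvHi m j ≤ m := by
  unfold pvHi; split <;> omega

theorem sum_take_set (df : List Int) (i t : Nat) (v : Int) (h : i < df.length) :
    ((df.set i v).take t).sum = (df.take t).sum + (if i < t then v - df.getD i 0 else 0) := by
  induction df generalizing i t with
  | nil => simp at h
  | cons a df ih =>
    cases i with
    | zero =>
      cases t with
      | zero => simp
      | succ t => simp [List.getD]; ring
    | succ i =>
      cases t with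
      | zero => simp
      | succ t =>
        have h' : i < df.length := by simpa using h
        simp only [List.set_cons_succ, List.take_succ_cons, List.sum_cons, ih i t h',
          List.getD_cons_succ, Nat.add_lt_add_iff_right]
        ring

theorem pvDiffStep_eq (m d : Int) (df : List Int) (j : Int × Int) :
    pvDiffStep m d df j =
      if pvLo d j ≤ pvHi m j then
        PySem.List.pySetD
          (PySem.List.pySetD df (pvLo d j - 1) (PySem.List.pyGetD df (pvLo d j - 1) 0 + 1))
          (pvHi m j)
          (PySem.List.pyGetD
            (PySem.List.pySetD df (pvLo d j - 1) (PySem.List.pyGetD df (pvLo d j - 1) 0 + 1))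
            (pvHi m j) 0 - 1)
      else df := rfl

theorem pvDiffStep_length (m d : Int) (df : List Int) (j : Int × Int) :
    (pvDiffStep m d df j).length = df.length := by
  rw [pvDiffStep_eq]; split <;> simp [PySem.List.length_pySetD]

theorem pvDiffStep_take_sum (m d : Int) (hm : 1 ≤ m) (df : List Int) (j : Int × Int)
    (hlen : df.length = (m + 1).toNat) (t : Nat) :
    ((pvDiffStep m d df j).take t).sum
      = (df.take t).sum + (if pvLo d j ≤ (t : Int) ∧ (t : Int) ≤ pvHi m j then 1 else 0) := by
  have hlo := pvLo_ge_one d j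
  have hhi := pvHi_le m j
  rw [pvDiffStep_eq]
  split
  · rename_i hcase
    have h1 : (0:Int) ≤ pvLo d j - 1 := by omega
    have h2 : (0:Int) ≤ pvHi m j := by omega
    have hi1 : (pvLo d j - 1).toNat < df.length := by omega
    rw [PySem.List.pySetD_of_nonneg _ _ h1, PySem.List.pySetD_of_nonneg _ _ h2]
    have hi2 : (pvHi m j).toNat < (df.set (pvLo d j - 1).toNat
        (PySem.List.pyGetD df (pvLo d j - 1) 0 + 1)).length := by
      simp only [List.length_set]; omega
    rw [sum_take_set _ _ _ _ hi2, sum_take_set _ _ _ _ hi1]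
    have hg : PySem.List.pyGetD df (pvLo d j - 1) 0 = df.getD (pvLo d j - 1).toNat 0 := by
      rw [PySem.List.pyGetD_eq_getElem df 0 h1 (by omega), List.getD_eq_getElem df 0 (by omega)]
    have hg2 : PySem.List.pyGetD (df.set (pvLo d j - 1).toNat
          (PySem.List.pyGetD df (pvLo d j - 1) 0 + 1)) (pvHi m j) 0
        = (df.set (pvLo d j - 1).toNat
            (PySem.List.pyGetD df (pvLo d j - 1) 0 + 1)).getD (pvHi m j).toNat 0 := by
      rw [PySem.List.pyGetD_eq_getElem _ 0 h2 (by simp only [List.length_set]; omega),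
        List.getD_eq_getElem _ 0 (by simp only [List.length_set]; omega)]
    rw [hg] at hg2
    rw [hg, hg2]
    split_ifs <;> omega
  · rename_i hcase
    have : ¬ (pvLo d j ≤ (t : Int) ∧ (t : Int) ≤ pvHi m j) := by omega
    simp [this]

theorem foldDiff_length (m d : Int) (js : List (Int × Int)) (df : List Int) :
    (js.foldl (pvDiffStep m d) df).length = df.length := by
  induction js generalizing df with
  | nil => rfl
  | cons j js ih => simp only [List.foldl_cons]; rw [ih, pvDiffStep_length]

theorem foldDiff_take_sum (m d : Int) (hm : 1 ≤ m) (js : List (Int × Int)) (df : List Int)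
    (hlen : df.length = (m + 1).toNat) (t : Nat) :
    ((js.foldl (pvDiffStep m d) df).take t).sum
      = (df.take t).sum
        + (js.countP (fun j => decide (pvLo d j ≤ (t : Int) ∧ (t : Int) ≤ pvHi m j)) : Int) := by
  induction js generalizing df with
  | nil => simp
  | cons j js ih =>
    simp only [List.foldl_cons]
    rw [ih _ (by rw [pvDiffStep_length]; exact hlen), pvDiffStep_take_sum m d hm df j hlen t,
      List.countP_cons]
    by_cases hc : pvLo d j ≤ (t : Int) ∧ (t : Int) ≤ pvHi m j <;>
      simp [hc] <;> push_cast <;> omega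

theorem ofList_filter {α : Type} [BEq α] [LawfulBEq α] (p : α → Bool) (xs : List α) :
    PySem.Set.ofList (xs.filter p) = (PySem.Set.ofList xs).filter p := by
  induction xs using List.reverseRecOn with
  | nil => rfl
  | append_singleton xs x ih =>
    rw [List.filter_append, PySem.Set.ofList_append_singleton, PySem.Set.add_eq_ite]
    by_cases hp : p x
    · simp only [List.filter_cons, hp, if_pos, List.filter_nil]
      by_cases hx : x ∈ PySem.Set.ofList xs
      · rw [if_pos hx, PySem.Set.ofList_append_singleton, ih, PySem.Set.add_eq_ite,
          if_pos (List.mem_filter.2 ⟨hx, hp⟩)]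
      · rw [if_neg hx, PySem.Set.ofList_append_singleton, ih, PySem.Set.add_eq_ite,
          if_neg (fun hmem => hx (List.mem_filter.1 hmem).1), List.filter_append]
        simp [hp]
    · by_cases hx : x ∈ PySem.Set.ofList xs
      · rw [if_pos hx]; simpa [hp] using ih
      · rw [if_neg hx]; simpa [hp, List.filter_append] using ih

theorem cntA_eq (n d m : Int) (jobs : List (Int × Int)) (hm : m = n - d + 1)
    (s : Int) (h1 : 1 ≤ s) (h2 : s ≤ m) :
    ((PySem.Set.ofList (jobs.filter
        (fun job => !(decide (job.2 < s) || decide (job.1 > s + d - 1))))).length : Int)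
      = ((PySem.Set.ofList jobs).countP
          (fun j => decide (pvLo d j ≤ s ∧ s ≤ pvHi m j)) : Int) := by
  rw [ofList_filter, ← List.countP_eq_length_filter]
  congr 1
  apply List.countP_congr
  intro j _
  unfold pvLo pvHi
  rcases j with ⟨l, r⟩
  simp only [Bool.not_or, Bool.and_eq_true, Bool.not_eq_true', decide_eq_false_iff_not,
    decide_eq_true_eq, not_lt]
  constructor
  · rintro ⟨hr, hl⟩; split_ifs <;> simp_all <;> omega
  · intro h; split_ifs at h <;> simp_all <;> omega

theorem scan_eq (D : List Int) (m : Int) (f : Int → Int)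
    (hf : ∀ s : Int, 1 ≤ s → s ≤ m → f s = f (s - 1) + PySem.List.pyGetD D (s - 1) 0) :
    ∀ (len : Nat) (s0 : Int) (st : Int × Int × Int × Option Int), 1 ≤ s0 → s0 + len = m + 1 →
    (PySem.List.pyRange s0 (m + 1) 1).foldl
        (fun (st : Int × (Int × Int × Int × Option Int)) s =>
          (st.1 + PySem.List.pyGetD D (s - 1) 0,
           pvSel s (st.1 + PySem.List.pyGetD D (s - 1) 0) st.2)) (f (s0 - 1), st)
      = (f m, (PySem.List.pyRange s0 (m + 1) 1).foldl (fun st s => pvSel s (f s) st) st) := by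
  intro len
  induction len with
  | zero =>
    intro s0 st h1 h2
    have hle : m + 1 ≤ s0 := by omega
    have he : PySem.List.pyRange s0 (m + 1) 1 = [] := by
      simp [PySem.List.pyRange]; omega
    rw [he]
    simp only [List.foldl_nil]
    rw [show s0 - 1 = m by omega]
  | succ len ih =>
    intro s0 st h1 h2
    have hlt : s0 < m + 1 := by omega
    rw [PySem.List.pyRange_one_cons hlt]
    simp only [List.foldl_cons]
    have hstep := hf s0 h1 (by omega)
    rw [show f (s0 - 1) + PySem.List.pyGetD D (s0 - 1) 0 = f s0 from hstep.symm]
    have h := ih (s0 + 1) (pvSel s0 (f s0) st) (by omega) (by omega)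
    rw [show s0 + 1 - 1 = s0 by omega] at h
    exact h


-- ===== VERDICT (by name: the statement is the Claim_ definition above) =====
theorem solve_robin_hood_spec : Claim_equal_solve_robin_hood := by
  intro n d k jobs _ _
  unfold Spec_solve_robin_hood solve_robin_hood solve_robin_hood_alt
  by_cases hm1 : n - d + 1 < 1
  · have he : PySem.List.pyRange 1 (n - d + 2) 1 = [] := by
      simp [PySem.List.pyRange]; omega
    simp only [he, List.foldl_nil, if_pos hm1]
  · push_neg at hm1
    simp only [if_neg (by omega : ¬ n - d + 1 < 1)]
    set m := n - d + 1 with hmdef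
    set D := (PySem.Set.ofList jobs).foldl (pvDiffStep m d)
      (List.replicate (m + 1).toNat (0 : Int)) with hD
    have hlen : D.length = (m + 1).toNat := by
      rw [hD, foldDiff_length]; simp
    set f : Int → Int := fun s => ((D.take s.toNat).sum) with hfdef
    have hpsum : ∀ t : Nat, (D.take t).sum
        = ((PySem.Set.ofList jobs).countP
            (fun j => decide (pvLo d j ≤ (t : Int) ∧ (t : Int) ≤ pvHi m j)) : Int) := by
      intro t
      rw [hD, foldDiff_take_sum m d hm1 _ _ (by simp) t]
      simp [List.take_replicate]
    have hf : ∀ s : Int, 1 ≤ s → s ≤ m → f s = f (s - 1) + PySem.List.pyGetD D (s - 1) 0 := by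
      intro s hs1 hs2
      have ht : s.toNat = (s - 1).toNat + 1 := by omega
      have hidx : (s - 1).toNat < D.length := by omega
      rw [hfdef]
      simp only
      rw [ht, List.take_add_one, List.sum_append,
        List.getElem?_eq_getElem hidx]
      simp only [Option.toList_some, List.sum_cons, List.sum_nil, add_zero]
      congr 1
      rw [PySem.List.pyGetD_eq_getElem D 0 (by omega) (by push_cast; omega)]
    -- rewrite A's loop body into pvSel applied to f
    have hA : (PySem.List.pyRange 1 (m + 1) 1).foldl
        (fun (st : Int × Int × Int × Option Int) start =>
          let endd := start + d - 1
          let cnt : Int :=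
            ((PySem.Set.ofList (jobs.filter
                (fun job => !(decide (job.2 < start) || decide (job.1 > endd))))).length : Int)
          let st1 := if cnt > st.2.1 then (start, cnt, st.2.2) else st
          if (match st1.2.2.2 with | none => true | some v => decide (cnt < v)) then
            (st1.1, st1.2.1, start, some cnt)
          else st1) (1, 0, 1, none)
        = (PySem.List.pyRange 1 (m + 1) 1).foldl
            (fun st s => pvSel s (f s) st) (1, 0, 1, none) := by
      apply PySem.List.foldl_congr_mem
      intro acc s hs
      rw [PySem.List.mem_pyRange_one] at hs
      have hcnt : ((PySem.Set.ofList (jobs.filter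
            (fun job => !(decide (job.2 < s) || decide (job.1 > s + d - 1))))).length : Int)
          = f s := by
        rw [cntA_eq n d m jobs hmdef s hs.1 (by omega)]
        have := hpsum s.toNat
        rw [hfdef]
        simp only
        rw [this, Int.toNat_of_nonneg (by omega)]
      show pvSel s _ acc = pvSel s (f s) acc
      rw [hcnt]
    rw [show n - d + 2 = m + 1 by omega, hA]
    -- B's loop is the scanned form of the same fold
    have hscan := scan_eq D m f hf m.toNat 1 (1, 0, 1, none) (by omega) (by omega)
    have h0 : f (1 - 1) = 0 := by rw [hfdef]; simp
    rw [h0] at hscan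
    exact (congrArg (fun p => (p.2.1, p.2.2.2.1)) hscan).symm
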